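-- pv_equiv track=rewrite | github.com/pauloluniyi/VGEA | scripts/tools/CleanConsensuses.py | PropagateNoCoverageChar
-- ===== SOURCE A (Python) =====
-- def PropagateNoCoverageChar(seq, LeftToRightDone=False):
--   '''Iteratively replace gaps that border N by N.
--
--   Where N neighbours a gap, propagate N outwards until it touches bases on both
--   sides (because deletions should only be called when the bases on either side
--   are known). e.g.
--   ACTG---N---ACTG
--   becomes
--   ACTGNNNNNNNACTG'''
--
--   if LeftToRightDone:
--     seq = seq[::-1]
--   BaseToLeftIsNoCoverage = False
--   ResultingSeq = ''
--   for base in seq: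
--     if base == 'N':
--       BaseToLeftIsNoCoverage = True
--       ResultingSeq += 'N'
--     elif base == '-':
--       if BaseToLeftIsNoCoverage:
--         ResultingSeq += 'N'
--       else:
--         ResultingSeq += '-'
--     else:
--       BaseToLeftIsNoCoverage = False
--       ResultingSeq += base
--   if LeftToRightDone:
--     ResultingSeq = ResultingSeq[::-1]
--   else:
--     ResultingSeq = PropagateNoCoverageChar(ResultingSeq, True)
--   assert not "N-" in ResultingSeq and not "-N" in ResultingSeq
--   return ResultingSeq
-- ===== SOURCE B (Python) =====
-- def PropagateNoCoverageChar(seq, LeftToRightDone=False):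
--   '''Run-based rewrite: split the sequence into maximal runs of '-' and fill a
--   run with N in one scan when its neighbouring base is N (right neighbour only
--   when LeftToRightDone, either neighbour otherwise), instead of two stateful
--   directional character-by-character passes with a recursive reversed call.'''
--   pieces = []
--   i, n = 0, len(seq)
--   while i < n:
--     if seq[i] == '-':
--       j = i
--       while j < n and seq[j] == '-':
--         j += 1
--       left_is_N = (not LeftToRightDone) and i > 0 and seq[i - 1] == 'N'
--       right_is_N = j < n and seq[j] == 'N'
--       pieces.append('N' * (j - i) if left_is_N or right_is_N else seq[i:j])
--       i = j
--     else:
--       pieces.append(seq[i])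
--       i += 1
--   ResultingSeq = ''.join(pieces)
--   assert not "N-" in ResultingSeq and not "-N" in ResultingSeq
--   return ResultingSeq
-- ===== Notes on version B (the rewrite author's own statement) =====
-- stated objective: alternative
-- what changed: Replaces A's two stateful directional character-by-character passes (forward loop with a BaseToLeftIsNoCoverage flag plus a recursive call on the reversed string) with a single scan over maximal gap runs that fills a whole run with N when a neighbouring base is N (right neighbour only when LeftToRightDone, either neighbour otherwise).
import Mathlib
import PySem

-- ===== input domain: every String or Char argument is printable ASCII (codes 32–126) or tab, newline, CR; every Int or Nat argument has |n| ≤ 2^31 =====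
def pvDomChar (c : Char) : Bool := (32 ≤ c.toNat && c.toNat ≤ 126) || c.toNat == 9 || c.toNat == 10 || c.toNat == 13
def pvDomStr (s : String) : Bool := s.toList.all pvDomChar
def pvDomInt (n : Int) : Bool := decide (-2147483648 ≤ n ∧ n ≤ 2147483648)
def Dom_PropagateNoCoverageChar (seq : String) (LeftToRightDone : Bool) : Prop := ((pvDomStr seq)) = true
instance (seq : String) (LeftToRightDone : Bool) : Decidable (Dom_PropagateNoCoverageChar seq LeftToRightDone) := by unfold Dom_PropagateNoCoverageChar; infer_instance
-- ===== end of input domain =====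

-- B replaces A's two stateful directional character-by-character passes (plus reversed
-- recursive call) by a single scan over maximal gap runs, filling a whole run when a
-- neighbouring base is N; equivalence is about the returned value (inside Pre_ neither
-- program's assert fires).

-- ===== PORT A =====
-- the for-loop over `seq` with the mutable flag BaseToLeftIsNoCoverage, transcribed as
-- structural recursion threading the same flag
def pvPassA : Bool → List Char → List Char
  | _, [] => []
  | b, c :: t =>
    if c = 'N' then 'N' :: pvPassA true t
    else if c = '-' then (if b then 'N' else '-') :: pvPassA b t
    else c :: pvPassA false t

def PropagateNoCoverageChar (seq : String) (LeftToRightDone : Bool) : String :=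
  if LeftToRightDone then
    -- seq[::-1], the loop, ResultingSeq[::-1]; the assert raises only outside Pre_
    String.ofList (pvPassA false seq.toList.reverse).reverse
  else
    -- the loop, then the recursive call with LeftToRightDone=True
    PropagateNoCoverageChar (String.ofList (pvPassA false seq.toList)) true
termination_by (if LeftToRightDone then 1 else 2)
decreasing_by simp_all

-- ===== PORT B =====
-- Source B's while-loop: emit non-gap chars one by one; on a gap, take the whole maximal
-- run and fill it with N iff a neighbouring base is N; left is the previous char (none at i=0).
def pvFillRuns (LeftToRightDone : Bool) (left : Option Char) : List Char → List Char
  | [] => []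
  | c :: t =>
    if c = '-' then
      let run := c :: t.takeWhile (· == '-')
      let rest := t.dropWhile (· == '-')
      let fill := (!LeftToRightDone && left == some 'N') || rest.head? == some 'N'
      (if fill then List.replicate run.length 'N' else run) ++ pvFillRuns LeftToRightDone (some '-') rest
    else
      c :: pvFillRuns LeftToRightDone (some c) t
termination_by l => l.length
decreasing_by
  · have := List.length_dropWhile_le (· == '-') t; simp; omega
  · simp

def PropagateNoCoverageChar_alt (seq : String) (LeftToRightDone : Bool) : String :=
  -- the assert raises only outside Pre_
  String.ofList (pvFillRuns LeftToRightDone none seq.toList)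

-- ===== PRECONDITION & SPEC =====
-- With LeftToRightDone=True both programs' assert fails (AssertionError) exactly when the
-- string contains an N followed by a nonempty gap run that does not end at another N;
-- Pre_ excludes exactly those raising inputs (with LeftToRightDone=False A never raises).
def pvDangling : List Char → Bool
  | [] => false
  | c :: t =>
    if c = 'N' then
      (!(t.takeWhile (· == '-')).isEmpty && !((t.dropWhile (· == '-')).head? == some 'N'))
      || pvDangling (t.dropWhile (· == '-'))
    else pvDangling t
termination_by l => l.length
decreasing_by
  · have := List.length_dropWhile_le (· == '-') t; simp; omega
  · simp

def Pre_PropagateNoCoverageChar (seq : String) (LeftToRightDone : Bool) : Prop :=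
  LeftToRightDone = true → pvDangling seq.toList = false

instance (seq : String) (LeftToRightDone : Bool) : Decidable (Pre_PropagateNoCoverageChar seq LeftToRightDone) := by
  unfold Pre_PropagateNoCoverageChar; infer_instance

def pvWitness_PropagateNoCoverageChar : String × Bool := ("ACTG---N---ACTG", false)

def Spec_PropagateNoCoverageChar (seq : String) (LeftToRightDone : Bool) (out : String) : Prop := out = PropagateNoCoverageChar_alt seq LeftToRightDone
instance (seq : String) (LeftToRightDone : Bool) (out : String) : Decidable (Spec_PropagateNoCoverageChar seq LeftToRightDone out) := by unfold Spec_PropagateNoCoverageChar; infer_instance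

-- ===== CLAIM (what is proved, stated in full; the proofs are below) =====
def Claim_equal_PropagateNoCoverageChar : Prop := ∀ (seq : String) (LeftToRightDone : Bool), Dom_PropagateNoCoverageChar seq LeftToRightDone → Pre_PropagateNoCoverageChar seq LeftToRightDone → Spec_PropagateNoCoverageChar seq LeftToRightDone (PropagateNoCoverageChar seq LeftToRightDone)

-- ===== LEMMAS AND PROOFS =====

-- the value of A's flag after processing a list
def pvFlag : Bool → List Char → Bool
  | b, [] => b
  | b, c :: t => if c = 'N' then pvFlag true t else if c = '-' then pvFlag b t else pvFlag false t

theorem pvPassA_append (m n : List Char) : ∀ b, pvPassA b (m ++ n) = pvPassA b m ++ pvPassA (pvFlag b m) n := by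
  induction m with
  | nil => intro b; simp [pvPassA, pvFlag]
  | cons c t ih => intro b; simp only [List.cons_append, pvPassA, pvFlag]; split_ifs <;> simp [ih]

theorem pvFlag_append (m n : List Char) : ∀ b, pvFlag b (m ++ n) = pvFlag (pvFlag b m) n := by
  induction m with
  | nil => intro b; simp [pvFlag]
  | cons c t ih => intro b; simp only [List.cons_append, pvFlag]; split_ifs <;> simp [ih]

theorem pvPassA_indep (l : List Char) (h : l.head? ≠ some '-') (b b' : Bool) :
    pvPassA b l = pvPassA b' l := by
  cases l with
  | nil => rfl
  | cons c t =>
    simp only [List.head?_cons, ne_eq, Option.some.injEq] at h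
    simp [pvPassA, h]

theorem pvPassA_head? (l : List Char) (h : l.head? ≠ some '-') (b : Bool) :
    (pvPassA b l).head? = l.head? := by
  cases l with
  | nil => rfl
  | cons c t =>
    simp only [List.head?_cons, ne_eq, Option.some.injEq] at h
    by_cases hc : c = 'N' <;> simp [pvPassA, hc, h]

theorem pvPassA_replicate (k : Nat) (b : Bool) :
    pvPassA b (List.replicate k '-') = List.replicate k (if b then 'N' else '-') := by
  induction k with
  | zero => rfl
  | succ k ih => simp [List.replicate_succ, pvPassA, ih]

theorem pvFlag_replicate (k : Nat) (b : Bool) : pvFlag b (List.replicate k '-') = b := by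
  induction k with
  | zero => rfl
  | succ k ih => simp [List.replicate_succ, pvFlag, ih]

-- the flag after processing a reversed list whose head is not '-'
theorem pvFlag_reverse (d : List Char) (h : d.head? ≠ some '-') :
    pvFlag false d.reverse = (d.head? == some 'N') := by
  cases d with
  | nil => rfl
  | cons e t =>
    simp only [List.head?_cons, ne_eq, Option.some.injEq] at h
    rw [List.reverse_cons, pvFlag_append]
    by_cases he : e = 'N' <;> simp [pvFlag, he, h]

-- takeWhile / dropWhile through a gap run followed by a non-gap head
theorem pvTakeDrop (k : Nat) (m : List Char) (h : m.head? ≠ some '-') :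
    (List.replicate k '-' ++ m).takeWhile (· == '-') = List.replicate k '-' ∧
    (List.replicate k '-' ++ m).dropWhile (· == '-') = m := by
  induction k with
  | zero =>
    cases m with
    | nil => simp
    | cons e t =>
      simp only [List.head?_cons, ne_eq, Option.some.injEq] at h
      simp [List.dropWhile_cons, h]
  | succ k ih =>
    simp [List.replicate_succ, List.takeWhile_cons, List.dropWhile_cons, ih.1, ih.2]

-- the maximal gap run of t is a replicate, and what follows does not start with '-'
theorem pvRunShape (t : List Char) :
    t.takeWhile (· == '-') = List.replicate (t.takeWhile (· == '-')).length '-' ∧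
    (t.dropWhile (· == '-')).head? ≠ some '-' := by
  constructor
  · rw [List.eq_replicate_iff]
    exact ⟨rfl, fun b hb => by simpa using List.mem_takeWhile_imp hb⟩
  · cases hd : t.dropWhile (· == '-') with
    | nil => simp
    | cons e t' =>
      have : (· == '-') ((t.dropWhile (· == '-')).head (by simp [hd])) = false :=
        List.head_dropWhile_not (· == '-') (by simp [hd])
      simp only [hd, List.head_cons, beq_eq_false_iff_ne, ne_eq] at this
      simp [hd, this]

-- filling through one maximal gap run
theorem pvFillRuns_run (ltr : Bool) (left : Option Char) (k : Nat) (m : List Char) (h : m.head? ≠ some '-') :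
    pvFillRuns ltr left (List.replicate (k + 1) '-' ++ m) =
      (if ((!ltr && left == some 'N') || m.head? == some 'N') = true then List.replicate (k + 1) 'N'
       else List.replicate (k + 1) '-') ++ pvFillRuns ltr (some '-') m := by
  obtain ⟨htw, hdw⟩ := pvTakeDrop k m h
  rw [List.replicate_succ, List.cons_append, pvFillRuns]
  simp only [reduceIte, htw, hdw]
  congr 1
  split <;> simp [List.replicate_succ]

-- KEY 1: A's reversed pass (right-to-left fill) equals B's run scan in True mode,
-- for every value of `left` (True mode ignores it)
theorem pvKey1 : ∀ (n : Nat) (l : List Char), l.length ≤ n → ∀ left,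
    (pvPassA false l.reverse).reverse = pvFillRuns true left l := by
  intro n
  induction n with
  | zero => intro l hl left; simp at hl; simp [hl, pvPassA, pvFillRuns]
  | succ n ih =>
    intro l hl left
    cases l with
    | nil => simp [pvPassA, pvFillRuns]
    | cons c t =>
      by_cases hc : c = '-'
      · subst hc
        obtain ⟨hr, hd⟩ := pvRunShape t
        set k := (t.takeWhile (· == '-')).length with hk
        set d := t.dropWhile (· == '-') with hdd
        have ht : t = List.replicate k '-' ++ d := by rw [← hr]; exact (List.takeWhile_append_dropWhile).symm
        have hlen : d.length ≤ n := by
          have := List.length_dropWhile_le (· == '-') t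
          simp only [List.length_cons] at hl; rw [hdd]; omega
        have hfd : pvFlag false d.reverse = (d.head? == some 'N') := pvFlag_reverse d hd
        have hrun : ('-' : Char) :: t = List.replicate (k + 1) '-' ++ d := by
          rw [List.replicate_succ]; simp [ht]
        have lhs : (pvPassA false (('-' :: t).reverse)).reverse =
            List.replicate (k + 1) (if (d.head? == some 'N') then 'N' else '-') ++
              pvFillRuns true (some '-') d := by
          rw [hrun, List.reverse_append, List.reverse_replicate, pvPassA_append,
            pvPassA_replicate, hfd, List.reverse_append, List.reverse_replicate]
          rw [ih d hlen (some '-')]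
        rw [lhs, hrun, pvFillRuns_run true left k d hd]
        simp only [Bool.not_true, Bool.false_and, Bool.false_or]
        by_cases hN : (d.head? == some 'N') = true <;> simp [hN]
      · have lhs : (pvPassA false ((c :: t).reverse)).reverse = c :: (pvPassA false t.reverse).reverse := by
          rw [List.reverse_cons, pvPassA_append]
          have : pvPassA (pvFlag false t.reverse) [c] = [c] := by
            by_cases hN : c = 'N' <;> simp [pvPassA, hN, hc]
          rw [this, List.reverse_append]
          simp
        have hlen : t.length ≤ n := by simp only [List.length_cons] at hl; omega
        rw [lhs, ih t hlen (some c), pvFillRuns]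
        simp [hc]

theorem pvFillRuns_true_irrel (l : List Char) (left left' : Option Char) :
    pvFillRuns true left l = pvFillRuns true left' l := by
  rw [← pvKey1 l.length l le_rfl left, pvKey1 l.length l le_rfl left']

theorem pvFillRuns_N_prefix (k : Nat) (m : List Char) : ∀ left,
    pvFillRuns true left (List.replicate k 'N' ++ m) = List.replicate k 'N' ++ pvFillRuns true none m := by
  induction k with
  | zero => intro left; simpa using pvFillRuns_true_irrel m left none
  | succ k ih =>
    intro left
    rw [List.replicate_succ, List.cons_append, pvFillRuns]
    simp only [if_neg (by decide : ¬('N' : Char) = '-')]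
    rw [ih (some 'N')]
    simp [List.replicate_succ]

-- KEY 2: B's two-sided scan equals the True-mode scan applied after A's first pass
theorem pvKey2 : ∀ (n : Nat) (l : List Char), l.length ≤ n → ∀ left : Option Char,
    pvFillRuns false left l = pvFillRuns true none (pvPassA (left == some 'N') l) := by
  intro n
  induction n with
  | zero => intro l hl left; simp at hl; simp [hl, pvPassA, pvFillRuns]
  | succ n ih =>
    intro l hl left
    cases l with
    | nil => simp [pvPassA, pvFillRuns]
    | cons c t =>
      by_cases hc : c = '-'
      · subst hc
        obtain ⟨hr, hd⟩ := pvRunShape t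
        set k := (t.takeWhile (· == '-')).length with hk
        set d := t.dropWhile (· == '-') with hdd
        have ht : t = List.replicate k '-' ++ d := by rw [← hr]; exact (List.takeWhile_append_dropWhile).symm
        have hlen : d.length ≤ n := by
          have := List.length_dropWhile_le (· == '-') t
          simp only [List.length_cons] at hl; rw [hdd]; omega
        have hrun : ('-' : Char) :: t = List.replicate (k + 1) '-' ++ d := by
          rw [List.replicate_succ]; simp [ht]
        have tail : pvFillRuns false (some '-') d = pvFillRuns true none (pvPassA false d) := by
          simpa using ih d hlen (some '-')
        rw [hrun, pvFillRuns_run false left k d hd, pvPassA_append, pvPassA_replicate, pvFlag_replicate]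
        simp only [Bool.not_false, Bool.true_and]
        cases hb : (left == some 'N') with
        | true =>
          simp only [Bool.true_or, reduceIte]
          rw [pvPassA_indep d hd true false, pvFillRuns_N_prefix, tail]
        | false =>
          have hph : (pvPassA false d).head? = d.head? := pvPassA_head? d hd false
          have hph' : (pvPassA false d).head? ≠ some '-' := by rw [hph]; exact hd
          rw [if_neg (show ¬false = true by decide)]
          simp only [Bool.false_or]
          rw [pvFillRuns_run true none k _ hph', hph, tail,
            pvFillRuns_true_irrel (pvPassA false d) (some '-') none]
          simp only [Bool.not_true, Bool.false_and, Bool.false_or]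
      · have hlen : t.length ≤ n := by simp only [List.length_cons] at hl; omega
        rw [pvFillRuns]
        simp only [if_neg hc]
        by_cases hN : c = 'N'
        · subst hN
          rw [pvPassA, if_pos rfl, pvFillRuns]
          simp only [if_neg (by decide : ¬('N' : Char) = '-')]
          rw [ih t hlen (some 'N')]
          exact congrArg (List.cons 'N') (pvFillRuns_true_irrel _ _ _)
        · rw [pvPassA, if_neg hN, if_neg hc, pvFillRuns]
          simp only [if_neg hc]
          rw [ih t hlen (some c)]
          have hcc : (some c == some 'N') = false := by simp [hN]
          rw [hcc]
          exact congrArg (List.cons c) (pvFillRuns_true_irrel _ _ _)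

-- ===== VERDICT (by name: the statement is the Claim_ definition above) =====
theorem PropagateNoCoverageChar_spec : Claim_equal_PropagateNoCoverageChar := by
  unfold Claim_equal_PropagateNoCoverageChar
  intro seq ltr _ _
  unfold Spec_PropagateNoCoverageChar PropagateNoCoverageChar_alt
  cases ltr with
  | true =>
    rw [PropagateNoCoverageChar]
    simp only [if_pos rfl]
    exact congrArg String.ofList (pvKey1 seq.toList.length seq.toList le_rfl none)
  | false =>
    rw [PropagateNoCoverageChar]
    simp only [Bool.false_eq_true, if_neg (by decide : ¬false = true)]
    rw [PropagateNoCoverageChar]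
    simp only [if_pos rfl]
    apply congrArg String.ofList
    have hs : (String.ofList (pvPassA false seq.toList)).toList = pvPassA false seq.toList := by simp
    rw [hs, pvKey1 (pvPassA false seq.toList).length _ le_rfl none]
    have := pvKey2 seq.toList.length seq.toList le_rfl none
    simpa using this.symm
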